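-- pv_equiv track=rewrite | github.com/shravani-tambe/dsl-labs | Data Structures Laboratory/grp_a_exp1.py | opt3
-- ===== SOURCE A (Python) =====
-- def opt3(cricket, badminton, tot):
--     all_cricket_badminton = cricket + badminton
--     unique_cricket_badminton = []
--
--     # Remove duplicates
--     for i in all_cricket_badminton:
--         if i not in unique_cricket_badminton:
--             unique_cricket_badminton.append(i)
--
--     # Calculate students who play neither cricket nor badminton
--     neither_count = tot - len(unique_cricket_badminton)
--     return neither_count
-- ===== SOURCE B (Python) =====
-- def opt3(cricket, badminton, tot):
--     xs = sorted(cricket + badminton)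
--     if not xs:
--         return tot
--     distinct = 1
--     for prev, cur in zip(xs, xs[1:]):
--         if prev != cur:
--             distinct += 1
--     return tot - distinct
-- ===== Notes on version B (the rewrite author's own statement) =====
-- stated objective: faster
-- what changed: Replaces A's quadratic dedup-by-linear-membership pass with sort-then-scan: sort the combined list and count boundaries between adjacent unequal elements, an O(n log n) algorithm maintaining no seen-collection at all.
import Mathlib
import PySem

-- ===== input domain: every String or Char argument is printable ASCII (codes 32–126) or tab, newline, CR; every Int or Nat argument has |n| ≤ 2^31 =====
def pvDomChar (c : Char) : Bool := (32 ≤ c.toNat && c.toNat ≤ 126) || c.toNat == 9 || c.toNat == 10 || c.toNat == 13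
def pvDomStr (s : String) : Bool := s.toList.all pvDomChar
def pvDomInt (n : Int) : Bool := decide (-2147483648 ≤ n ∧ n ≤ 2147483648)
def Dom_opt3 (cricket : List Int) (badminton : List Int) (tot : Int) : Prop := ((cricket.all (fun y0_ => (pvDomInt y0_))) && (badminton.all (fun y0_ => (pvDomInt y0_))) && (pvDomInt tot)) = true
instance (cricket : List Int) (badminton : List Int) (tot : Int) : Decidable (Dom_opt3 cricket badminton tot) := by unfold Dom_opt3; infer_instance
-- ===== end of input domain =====

-- B replaces A's quadratic membership-list dedup with sort-then-scan: sort the combined list and count adjacent boundaries (faster algorithm).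


-- ===== PORT A =====
def opt3 (cricket : List Int) (badminton : List Int) (tot : Int) : Int :=
  let all_cricket_badminton := cricket ++ badminton
  -- Remove duplicates
  let unique_cricket_badminton :=
    all_cricket_badminton.foldl
      (fun unique i => if unique.contains i then unique else unique ++ [i]) []
  -- Calculate students who play neither cricket nor badminton
  tot - unique_cricket_badminton.length

-- ===== PORT B =====
def opt3_alt (cricket : List Int) (badminton : List Int) (tot : Int) : Int :=
  let xs := PySem.List.sorted (cricket ++ badminton) (fun x => x) false
  match xs with
  | [] => tot
  | _ :: _ =>
    let distinct : Int :=
      (xs.zip (PySem.List.slice xs (some 1) none)).foldl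
        (fun d p => if p.1 ≠ p.2 then d + 1 else d) 1
    tot - distinct

-- ===== PRECONDITION & SPEC =====
def Spec_opt3 (cricket : List Int) (badminton : List Int) (tot : Int) (out : Int) : Prop := out = opt3_alt cricket badminton tot
instance (cricket : List Int) (badminton : List Int) (tot : Int) (out : Int) : Decidable (Spec_opt3 cricket badminton tot out) := by unfold Spec_opt3; infer_instance

-- ===== CLAIM (what is proved, stated in full; the proofs are below) =====
def Claim_equal_opt3 : Prop := ∀ (cricket : List Int) (badminton : List Int) (tot : Int), Dom_opt3 cricket badminton tot → Spec_opt3 cricket badminton tot (opt3 cricket badminton tot)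

-- ===== LEMMAS AND PROOFS =====

-- A's hand-written dedup loop is exactly PySem.Set.ofList
theorem opt3_loop_eq_ofList (xs : List Int) :
    xs.foldl (fun unique i => if unique.contains i then unique else unique ++ [i]) [] =
    PySem.Set.ofList xs := rfl

theorem toFinset_ofList (xs : List Int) :
    (PySem.Set.ofList xs).toFinset = xs.toFinset := by
  ext a; simp [PySem.Set.mem_ofList]

theorem length_ofList_eq_card (xs : List Int) :
    (PySem.Set.ofList xs).length = xs.toFinset.card := by
  rw [← toFinset_ofList, List.toFinset_card_of_nodup (PySem.Set.nodup_ofList xs)]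

-- B's counting fold is 1 + the number of unequal adjacent pairs
theorem foldl_count (l : List (Int × Int)) (init : Int) :
    l.foldl (fun d p => if p.1 ≠ p.2 then d + 1 else d) init =
    init + (l.countP (fun p => decide (p.1 ≠ p.2)) : Int) := by
  induction l generalizing init with
  | nil => simp
  | cons p t ih =>
    simp only [List.foldl_cons, List.countP_cons, ih]
    by_cases h : p.1 = p.2
    · simp [h]
    · simp [h]; ring

-- on a weakly increasing list, 1 + #(adjacent unequal pairs) = #(distinct elements)
theorem boundaries_eq_card (a : Int) (t : List Int)
    (hs : (a :: t).Pairwise (· ≤ ·)) :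
    1 + ((a :: t).zip t).countP (fun p => decide (p.1 ≠ p.2)) = (a :: t).toFinset.card := by
  induction t generalizing a with
  | nil => simp
  | cons b t' ih =>
    have hs' : (b :: t').Pairwise (· ≤ ·) := hs.tail
    have hab : a ≤ b := (List.pairwise_cons.mp hs).1 b (by simp)
    have ihb := ih b hs'
    by_cases h : a = b
    · subst h
      simp only [List.zip_cons_cons, List.countP_cons]
      simp only [List.toFinset_cons] at *
      rw [Finset.insert_idem]
      simpa using ihb
    · have hnot : a ∉ (b :: t').toFinset := by
        intro hmem
        simp only [List.mem_toFinset, List.mem_cons] at hmem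
        rcases hmem with h1 | h1
        · exact h h1
        · have hbx : b ≤ a := by
            have := (List.pairwise_cons.mp hs').1 a h1
            exact this
          omega
      simp only [List.zip_cons_cons, List.countP_cons]
      rw [List.toFinset_cons, Finset.card_insert_of_notMem (by simpa using hnot)]
      simp only [← ihb]
      simp [h]
      omega

-- ===== VERDICT (by name: the statement is the Claim_ definition above) =====
theorem opt3_spec : Claim_equal_opt3 := by
  intro cricket badminton tot _
  show opt3 cricket badminton tot = opt3_alt cricket badminton tot
  unfold opt3 opt3_alt
  simp only [opt3_loop_eq_ofList]
  rw [length_ofList_eq_card]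
  rcases hxs : PySem.List.sorted (cricket ++ badminton) (fun x => x) false with _ | ⟨a, t⟩
  · -- sorted list empty ⇒ combined list empty
    have : cricket ++ badminton = [] := by
      rwa [PySem.List.sorted_eq_nil_iff] at hxs
    simp [this]
  · have hperm : (a :: t).Perm (cricket ++ badminton) := by
      rw [← hxs]; exact PySem.List.sorted_perm _ _ _
    have hfin : (a :: t).toFinset = (cricket ++ badminton).toFinset := List.toFinset_eq_of_perm _ _ hperm
    have hpw : (a :: t).Pairwise (· ≤ ·) := by
      have := PySem.List.sorted_pairwise (cricket ++ badminton) (fun x => x)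
      rwa [hxs] at this
    have hslice : PySem.List.slice (a :: t) (some 1) none = t := by
      have := PySem.List.slice_from_natCast (xs := a :: t) (a := 1)
      simpa using this
    have hb := boundaries_eq_card a t hpw
    rw [hfin] at hb
    simp only [hslice, foldl_count]
    omega
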